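-- pv_equiv track=rewrite | github.com/TrapsterDK/URChess | findchessboard.py | remove_close_lines
-- ===== SOURCE A (Python) =====
-- def remove_close_lines(lines, threshold = 10):
--     # remove lines that are close to each other
--     new_lines = [lines[0]]
--     for line in lines:
--         rho = line[0]
--         for new_line in new_lines:
--             if abs(new_line[0] - rho) < threshold:
--                 break
--         else:
--             new_lines.append(line)
--
--     return new_lines
-- ===== SOURCE B (Python) =====
-- def remove_close_lines(lines, threshold = 10):
--     # keep an auxiliary sorted list of kept rhos; locate the nearest kept rho by
--     # hand-rolled binary search and compare only the two neighbours
--     def bisect_left(a, x):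
--         lo, hi = 0, len(a)
--         while lo < hi:
--             mid = (lo + hi) // 2
--             if a[mid] < x:
--                 lo = mid + 1
--             else:
--                 hi = mid
--         return lo
--
--     new_lines = [lines[0]]
--     rhos = [lines[0][0]]
--     for line in lines:
--         rho = line[0]
--         i = bisect_left(rhos, rho)
--         if (i > 0 and rho - rhos[i - 1] < threshold) or \
--            (i < len(rhos) and rhos[i] - rho < threshold):
--             continue
--         new_lines.append(line)
--         rhos.insert(i, rho)
--     return new_lines
-- ===== Notes on version B (the rewrite author's own statement) =====
-- stated objective: alternative
-- what changed: B maintains an auxiliary sorted list of kept rhos and, for each line, binary-searches the insertion point and compares only the two neighbouring rhos, instead of A's linear scan over all kept lines.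
-- outside the precondition, e.g. on remove_close_lines([], 10): A raises IndexError, B raises IndexError
import Mathlib
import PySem

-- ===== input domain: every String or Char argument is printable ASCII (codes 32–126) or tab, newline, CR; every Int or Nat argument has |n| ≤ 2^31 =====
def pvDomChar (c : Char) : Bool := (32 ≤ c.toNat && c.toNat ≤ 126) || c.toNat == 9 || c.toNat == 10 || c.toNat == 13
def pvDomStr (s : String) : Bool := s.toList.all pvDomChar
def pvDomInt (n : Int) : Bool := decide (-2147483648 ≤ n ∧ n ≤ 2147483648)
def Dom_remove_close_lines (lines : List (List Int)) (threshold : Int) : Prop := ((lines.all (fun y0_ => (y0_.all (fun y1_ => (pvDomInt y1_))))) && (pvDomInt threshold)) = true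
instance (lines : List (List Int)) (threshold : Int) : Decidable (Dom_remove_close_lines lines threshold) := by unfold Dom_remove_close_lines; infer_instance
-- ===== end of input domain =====

-- B keeps an auxiliary sorted list of kept rhos and binary-searches it, comparing only
-- the two neighbouring rhos, instead of A's linear scan over all kept lines.

-- line[0] (exact inside Pre_, where every row is nonempty; the default is never reached there)
def hd0 (l : List Int) : Int := (PySem.List.pyGet? l 0).getD 0

-- ===== PORT A =====
-- A's inner 'for new_line in new_lines: … break / else: append' scan
def scanA (new_lines : List (List Int)) (rho threshold : Int) : Bool :=
  match new_lines with
  | [] => false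
  | nl :: rest => if |hd0 nl - rho| < threshold then true else scanA rest rho threshold

def remove_close_lines (lines : List (List Int)) (threshold : Int) : List (List Int) :=
  let first := (PySem.List.pyGet? lines 0).getD []
  lines.foldl (fun new_lines line =>
    if scanA new_lines (hd0 line) threshold then new_lines
    else new_lines ++ [line]) [first]

-- ===== PORT B =====
-- Source B's hand-written binary search (while lo < hi); the fuel hi - lo only bounds the
-- loop (each step shrinks hi - lo by at least one), it never changes the result;
-- indices stay in range, so getD is exact
def bisectLeftGo : Nat → List Int → Int → Nat → Nat → Nat
  | 0, _, _, lo, _ => lo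
  | fuel + 1, a, x, lo, hi =>
    if lo < hi then
      if a.getD ((lo + hi) / 2) 0 < x then bisectLeftGo fuel a x ((lo + hi) / 2 + 1) hi
      else bisectLeftGo fuel a x lo ((lo + hi) / 2)
    else lo

def bisectLeft (a : List Int) (x : Int) (lo hi : Nat) : Nat := bisectLeftGo (hi - lo) a x lo hi

-- loop body of Source B: state = (new_lines, sorted list of kept rhos)
def stepB (threshold : Int) (st : List (List Int) × List Int) (line : List Int) :
    List (List Int) × List Int :=
  let rho := hd0 line
  let i := bisectLeft st.2 rho 0 st.2.length
  if ((decide (0 < i) && decide (rho - st.2.getD (i - 1) 0 < threshold)) ||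
      (decide (i < st.2.length) && decide (st.2.getD i 0 - rho < threshold))) then st
  else (st.1 ++ [line], PySem.List.insert st.2 (i : Int) rho)

def remove_close_lines_alt (lines : List (List Int)) (threshold : Int) : List (List Int) :=
  let first := (PySem.List.pyGet? lines 0).getD []
  (lines.foldl (stepB threshold) ([first], [hd0 first])).1

-- ===== PRECONDITION & SPEC =====
-- Python A raises IndexError on lines = [] (lines[0]) and on any empty row (line[0]); Pre_ excludes exactly those.
def Pre_remove_close_lines (lines : List (List Int)) (threshold : Int) : Prop :=
  lines ≠ [] ∧ ∀ l ∈ lines, l ≠ []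
instance (lines : List (List Int)) (threshold : Int) : Decidable (Pre_remove_close_lines lines threshold) := by unfold Pre_remove_close_lines; infer_instance
def pvWitness_remove_close_lines : List (List Int) × Int := ([[0, 1], [5, 2], [20, 3]], 10)

def Spec_remove_close_lines (lines : List (List Int)) (threshold : Int) (out : List (List Int)) : Prop := out = remove_close_lines_alt lines threshold
instance (lines : List (List Int)) (threshold : Int) (out : List (List Int)) : Decidable (Spec_remove_close_lines lines threshold out) := by unfold Spec_remove_close_lines; infer_instance

-- ===== CLAIM (what is proved, stated in full; the proofs are below) =====
def Claim_equal_remove_close_lines : Prop := ∀ (lines : List (List Int)) (threshold : Int), Dom_remove_close_lines lines threshold → Pre_remove_close_lines lines threshold → Spec_remove_close_lines lines threshold (remove_close_lines lines threshold)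

-- ===== LEMMAS AND PROOFS =====

-- sorted lists are monotone under getD (indices in range)
lemma getD_mono_of_sorted {a : List Int} (hs : a.Pairwise (· ≤ ·)) {j k : Nat}
    (hjk : j ≤ k) (hk : k < a.length) : a.getD j 0 ≤ a.getD k 0 := by
  rcases eq_or_lt_of_le hjk with rfl | h
  · rfl
  · rw [List.getD_eq_getElem _ _ (lt_trans h hk), List.getD_eq_getElem _ _ hk]
    exact (List.pairwise_iff_getElem.mp hs) j k _ hk h

lemma bisectLeft_spec_aux (a : List Int) (x : Int) (hs : a.Pairwise (· ≤ ·)) :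
    ∀ (n lo hi : Nat), hi - lo ≤ n → hi ≤ a.length → lo ≤ hi →
      (∀ j < lo, a.getD j 0 < x) → (∀ j, hi ≤ j → j < a.length → x ≤ a.getD j 0) →
      lo ≤ bisectLeftGo n a x lo hi ∧ bisectLeftGo n a x lo hi ≤ hi ∧
        (∀ j < bisectLeftGo n a x lo hi, a.getD j 0 < x) ∧
        (∀ j, bisectLeftGo n a x lo hi ≤ j → j < a.length → x ≤ a.getD j 0) := by
  intro n
  induction n with
  | zero =>
    intro lo hi hn hhl hle hlo hhi
    simp only [bisectLeftGo]
    exact ⟨le_refl _, hle, hlo, fun j hj hjl => hhi j (by omega) hjl⟩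
  | succ n ih =>
    intro lo hi hn hhl hle hlo hhi
    by_cases h : lo < hi
    · rw [bisectLeftGo, if_pos h]
      by_cases hm : a.getD ((lo + hi) / 2) 0 < x
      · rw [if_pos hm]
        have hrec := ih ((lo + hi) / 2 + 1) hi (by omega) hhl (by omega)
          (fun j hj => lt_of_le_of_lt (getD_mono_of_sorted hs (by omega) (by omega)) hm) hhi
        exact ⟨by omega, hrec.2.1, hrec.2.2⟩
      · rw [if_neg hm]
        have hrec := ih lo ((lo + hi) / 2) (by omega) (by omega) (by omega) hlo
          (fun j hj hjl => le_trans (not_lt.mp hm) (getD_mono_of_sorted hs hj hjl))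
        exact ⟨hrec.1, by omega, hrec.2.2⟩
    · rw [bisectLeftGo, if_neg h]
      exact ⟨le_refl _, hle, hlo, fun j hj hjl => hhi j (by omega) hjl⟩

lemma bisectLeft_main (a : List Int) (x : Int) (hs : a.Pairwise (· ≤ ·)) :
    bisectLeft a x 0 a.length ≤ a.length ∧
      (∀ j < bisectLeft a x 0 a.length, a.getD j 0 < x) ∧
      (∀ j, bisectLeft a x 0 a.length ≤ j → j < a.length → x ≤ a.getD j 0) := by
  have h := bisectLeft_spec_aux a x hs (a.length - 0) 0 a.length (by omega) (le_refl _)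
    (by omega) (by omega) (by omega)
  exact ⟨h.2.1, h.2.2⟩

-- Source B's two-neighbour test decides, for a sorted rho list, "some kept rho is close"
lemma nearCheck_iff (rhos : List Int) (rho t : Int) (hs : rhos.Pairwise (· ≤ ·)) :
    (((decide (0 < bisectLeft rhos rho 0 rhos.length) &&
       decide (rho - rhos.getD (bisectLeft rhos rho 0 rhos.length - 1) 0 < t)) ||
      (decide (bisectLeft rhos rho 0 rhos.length < rhos.length) &&
       decide (rhos.getD (bisectLeft rhos rho 0 rhos.length) 0 - rho < t))) = true) ↔
    ∃ r ∈ rhos, |r - rho| < t := by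
  obtain ⟨hle, hlt, hge⟩ := bisectLeft_main rhos rho hs
  set i := bisectLeft rhos rho 0 rhos.length with hi
  simp only [Bool.or_eq_true, Bool.and_eq_true, decide_eq_true_eq]
  constructor
  · rintro (⟨h0, hd⟩ | ⟨hlen, hd⟩)
    · have hjl : i - 1 < rhos.length := by omega
      refine ⟨rhos[i - 1], List.getElem_mem hjl, ?_⟩
      have h1 : rhos.getD (i - 1) 0 = rhos[i - 1] := List.getD_eq_getElem _ _ hjl
      have h2 := hlt (i - 1) (by omega)
      rw [abs_sub_lt_iff]; omega
    · refine ⟨rhos[i], List.getElem_mem hlen, ?_⟩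
      have h1 : rhos.getD i 0 = rhos[i] := List.getD_eq_getElem _ _ hlen
      have h2 := hge i (le_refl _) hlen
      rw [abs_sub_lt_iff]; omega
  · rintro ⟨r, hmem, habs⟩
    obtain ⟨j, hj, rfl⟩ := List.mem_iff_getElem.mp hmem
    rw [abs_sub_lt_iff] at habs
    have hjD : rhos.getD j 0 = rhos[j] := List.getD_eq_getElem _ _ hj
    by_cases hji : j < i
    · left
      have h1 : rhos.getD j 0 ≤ rhos.getD (i - 1) 0 := getD_mono_of_sorted hs (by omega) (by omega)
      exact ⟨by omega, by omega⟩
    · right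
      have h1 : rhos.getD i 0 ≤ rhos.getD j 0 := getD_mono_of_sorted hs (by omega) hj
      exact ⟨by omega, by omega⟩

-- inserting at the bisect position keeps the rho list sorted, and is a permutation of consing
lemma insert_sorted_perm (rhos : List Int) (rho : Int) (hs : rhos.Pairwise (· ≤ ·)) :
    (PySem.List.insert rhos ((bisectLeft rhos rho 0 rhos.length : Nat) : Int) rho).Pairwise (· ≤ ·) ∧
      (PySem.List.insert rhos ((bisectLeft rhos rho 0 rhos.length : Nat) : Int) rho).Perm
        (rho :: rhos) := by
  obtain ⟨hle, hlt, hge⟩ := bisectLeft_main rhos rho hs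
  set i := bisectLeft rhos rho 0 rhos.length with hi
  rw [PySem.List.insert_natCast rhos i rho hle]
  have hdropge : ∀ b ∈ rhos.drop i, rho ≤ b := by
    intro b hb
    obtain ⟨k, hk, hbk⟩ := List.mem_iff_getElem.mp hb
    have hkl : i + k < rhos.length := by
      have := List.length_drop (l := rhos) (i := i); omega
    have := hge (i + k) (by omega) hkl
    rw [List.getD_eq_getElem _ _ hkl] at this
    rw [← hbk, List.getElem_drop]
    exact this
  have htakelt : ∀ b ∈ rhos.take i, b < rho := by
    intro b hb
    obtain ⟨j, hj, hbj⟩ := List.mem_iff_getElem.mp hb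
    have hj' : j < i := by
      have := List.length_take (i := i) (l := rhos); omega
    have := hlt j hj'
    rw [List.getD_eq_getElem _ _ (by omega)] at this
    rw [← hbj, List.getElem_take]
    exact this
  constructor
  · rw [List.pairwise_append]
    refine ⟨List.Pairwise.sublist (List.take_sublist _ _) hs, ?_, ?_⟩
    · rw [List.pairwise_cons]
      exact ⟨hdropge, List.Pairwise.sublist (List.drop_sublist _ _) hs⟩
    · intro a ha b hb
      have ha' := htakelt a ha
      rcases List.mem_cons.mp hb with rfl | hb'
      · exact le_of_lt ha'
      · exact le_of_lt (lt_of_lt_of_le ha' (hdropge b hb'))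
  · have h1 : (rhos.take i ++ rho :: rhos.drop i).Perm
        (rho :: (rhos.take i ++ rhos.drop i)) := List.perm_middle
    rw [List.take_append_drop] at h1
    exact h1

lemma scanA_iff (nl : List (List Int)) (rho t : Int) :
    scanA nl rho t = true ↔ ∃ l ∈ nl, |hd0 l - rho| < t := by
  induction nl with
  | nil => simp [scanA]
  | cons h r ih => by_cases hc : |hd0 h - rho| < t <;> simp [scanA, hc, ih]

lemma fold_eq (t : Int) (lines : List (List Int)) :
    ∀ (nl : List (List Int)) (rhos : List Int),
      rhos.Pairwise (· ≤ ·) → rhos.Perm (nl.map hd0) →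
      (lines.foldl (stepB t) (nl, rhos)).1 =
        lines.foldl (fun new_lines line =>
          if scanA new_lines (hd0 line) t then new_lines else new_lines ++ [line]) nl := by
  induction lines with
  | nil => intro nl rhos _ _; rfl
  | cons line rest ih =>
    intro nl rhos hs hperm
    have hex : (∃ r ∈ rhos, |r - hd0 line| < t) ↔ ∃ l ∈ nl, |hd0 l - hd0 line| < t := by
      constructor
      · rintro ⟨r, hr, h⟩
        obtain ⟨l, hl, rfl⟩ := List.mem_map.mp (hperm.mem_iff.mp hr)
        exact ⟨l, hl, h⟩
      · rintro ⟨l, hl, h⟩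
        exact ⟨hd0 l, hperm.mem_iff.mpr (List.mem_map_of_mem hl), h⟩
    simp only [List.foldl_cons, stepB]
    by_cases hc : ∃ r ∈ rhos, |r - hd0 line| < t
    · rw [if_pos ((nearCheck_iff rhos (hd0 line) t hs).mpr hc),
        if_pos ((scanA_iff nl (hd0 line) t).mpr (hex.mp hc))]
      exact ih nl rhos hs hperm
    · rw [if_neg (fun h => hc ((nearCheck_iff rhos (hd0 line) t hs).mp h)),
        if_neg (by rw [scanA_iff]; exact fun h => hc (hex.mpr h))]
      obtain ⟨hs', hperm'⟩ := insert_sorted_perm rhos (hd0 line) hs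
      refine ih (nl ++ [line]) _ hs' ?_
      refine hperm'.trans ?_
      have hmap : (nl ++ [line]).map hd0 = nl.map hd0 ++ [hd0 line] := by simp
      rw [hmap]
      exact (hperm.cons _).trans (List.perm_append_singleton _ _).symm

-- ===== VERDICT (by name: the statement is the Claim_ definition above) =====
theorem remove_close_lines_spec : Claim_equal_remove_close_lines := by
  intro lines threshold _ _
  unfold Spec_remove_close_lines remove_close_lines remove_close_lines_alt
  exact (fold_eq threshold lines [_] [_] (List.pairwise_singleton _ _) (by simp)).symm
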